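-- pv_equiv track=rewrite | github.com/EduardoArgente13/python-practica-entrevistas | Beginner/Day29.py | students_with_no_courses
-- ===== SOURCE A (Python) =====
-- def students_with_no_courses(all_students, courses):
--     if not all_students:
--         return []
--
--     enrolled_students = set()
--     for student_list in courses.values():
--         enrolled_students.update(student_list)
--
--     res = []
--     for student in all_students:
--         if student not in enrolled_students:
--             res.append(student)
--
--     return res
-- ===== SOURCE B (Python) =====
-- def students_with_no_courses(all_students, courses):
--     return [s for s in all_students
--             if not any(s in lst for lst in courses.values())]
-- ===== Notes on version B (the rewrite author's own statement) =====
-- stated objective: simpler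
-- what changed: Drops the precomputed enrolled-set build pass and the explicit accumulator loop; a single comprehension keeps each student that no course list contains, scanning the course lists directly.
import Mathlib
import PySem

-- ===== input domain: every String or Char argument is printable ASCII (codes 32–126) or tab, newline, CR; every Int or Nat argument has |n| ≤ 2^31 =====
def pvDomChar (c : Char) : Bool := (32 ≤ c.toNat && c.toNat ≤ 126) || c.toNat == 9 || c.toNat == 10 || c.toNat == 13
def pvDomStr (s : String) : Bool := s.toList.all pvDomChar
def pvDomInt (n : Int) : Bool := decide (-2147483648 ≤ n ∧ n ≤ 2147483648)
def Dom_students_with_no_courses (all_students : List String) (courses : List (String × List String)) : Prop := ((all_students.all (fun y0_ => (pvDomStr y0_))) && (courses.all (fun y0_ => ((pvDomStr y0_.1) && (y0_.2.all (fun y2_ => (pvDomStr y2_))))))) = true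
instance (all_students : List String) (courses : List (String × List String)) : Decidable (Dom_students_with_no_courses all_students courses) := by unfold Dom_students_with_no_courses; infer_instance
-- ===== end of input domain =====

-- B replaces A's build-an-enrolled-set-then-filter with a single comprehension that scans the course lists per student (simpler, not faster).
-- ===== PORT A =====
def students_with_no_courses (all_students : List String) (courses : List (String × List String)) : List String :=
  if all_students = [] then []
  else
    let enrolled : PySem.Set String :=
      courses.foldl (fun s p => PySem.Set.update s p.2) PySem.Set.empty
    all_students.foldl
      (fun res student =>
        if PySem.Set.contains enrolled student then res else res ++ [student]) []

-- ===== PORT B =====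
-- B: one comprehension; a student is kept when no course list contains it.
def students_with_no_courses_alt (all_students : List String) (courses : List (String × List String)) : List String :=
  all_students.filter (fun s => ! courses.any (fun p => p.2.contains s))

-- ===== PRECONDITION & SPEC =====
def Spec_students_with_no_courses (all_students : List String) (courses : List (String × List String)) (out : List String) : Prop := out = students_with_no_courses_alt all_students courses
instance (all_students : List String) (courses : List (String × List String)) (out : List String) : Decidable (Spec_students_with_no_courses all_students courses out) := by unfold Spec_students_with_no_courses; infer_instance

-- ===== CLAIM (what is proved, stated in full; the proofs are below) =====
def Claim_equal_students_with_no_courses : Prop := ∀ (all_students : List String) (courses : List (String × List String)), Dom_students_with_no_courses all_students courses → Spec_students_with_no_courses all_students courses (students_with_no_courses all_students courses)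

-- ===== LEMMAS AND PROOFS =====

-- ===== VERDICT (by name: the statement is the Claim_ definition above) =====
theorem mem_update (s : PySem.Set String) (l : List String) (x : String) :
    x ∈ PySem.Set.update s l ↔ x ∈ s ∨ x ∈ l := by
  induction l generalizing s with
  | nil => simp [PySem.Set.update]
  | cons y ys ih =>
    rw [show PySem.Set.update s (y :: ys) = PySem.Set.update (PySem.Set.add s y) ys from rfl, ih]
    simp [PySem.Set.mem_add]
    tauto

theorem mem_enrolled (courses : List (String × List String)) (s0 : PySem.Set String) (x : String) :
    x ∈ courses.foldl (fun s p => PySem.Set.update s p.2) s0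
      ↔ x ∈ s0 ∨ ∃ p ∈ courses, x ∈ p.2 := by
  induction courses generalizing s0 with
  | nil => simp
  | cons c cs ih =>
    simp only [List.foldl_cons, ih, mem_update, List.mem_cons]
    constructor
    · rintro ((h|h)|⟨p,hp,h⟩) <;> first | exact Or.inl h | exact Or.inr ⟨_, Or.inl rfl, h⟩ | exact Or.inr ⟨p, Or.inr hp, h⟩
    · rintro (h|⟨p,(rfl|hp),h⟩) <;> first | exact Or.inl (Or.inl h) | exact Or.inl (Or.inr h) | exact Or.inr ⟨p, hp, h⟩

theorem students_with_no_courses_spec : Claim_equal_students_with_no_courses := by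
  intro all_students courses _
  unfold Spec_students_with_no_courses students_with_no_courses students_with_no_courses_alt
  by_cases h : all_students = []
  · simp [h]
  · simp only [if_neg h]
    rw [show (fun (res : List String) student =>
        if PySem.Set.contains (courses.foldl (fun s p => PySem.Set.update s p.2) PySem.Set.empty) student then res else res ++ [student])
      = (fun res student => if (! courses.any (fun p => p.2.contains student)) = true then res ++ [student] else res) from ?_]
    · rw [PySem.List.foldl_append_if_eq_filter]
      simp
    · funext res student
      have hm : PySem.Set.contains (courses.foldl (fun s p => PySem.Set.update s p.2) PySem.Set.empty) student
          = courses.any (fun p => p.2.contains student) := by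
        rw [Bool.eq_iff_iff]
        simp [PySem.Set.contains, mem_enrolled, PySem.Set.empty, List.any_eq_true]
      rw [hm]
      cases hc : courses.any (fun p => p.2.contains student) <;> simp [hc]
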